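-- pv_equiv track=rewrite | github.com/joelaniol/chatgtp-debugger | text_utils.py | _brace_delta
-- ===== SOURCE A (Python) =====
-- def _brace_delta(text: str) -> int:
--     delta = 0
--     in_string = False
--     quote_char = ""
--     escape = False
--     for ch in text:
--         if in_string:
--             if escape:
--                 escape = False
--             elif ch == "\\":
--                 escape = True
--             elif ch == quote_char:
--                 in_string = False
--         else:
--             if ch in ("\"", "'"):
--                 in_string = True
--                 quote_char = ch
--             elif ch in "{[":
--                 delta += 1
--             elif ch in "]}":
--                 delta -= 1
--     return delta
-- ===== SOURCE B (Python) =====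
-- def _brace_delta(text: str) -> int:
--     # Lex pass: drop string literals (with backslash escapes), then count braces.
--     kept = []
--     i = 0
--     n = len(text)
--     while i < n:
--         ch = text[i]
--         if ch == '"' or ch == "'":
--             i += 1
--             while i < n:
--                 if text[i] == "\\":
--                     i += 2
--                 elif text[i] == ch:
--                     i += 1
--                     break
--                 else:
--                     i += 1
--         else:
--             kept.append(ch)
--             i += 1
--     cleaned = "".join(kept)
--     return cleaned.count("{") + cleaned.count("[") - cleaned.count("]") - cleaned.count("}")
-- ===== Notes on version B (the rewrite author's own statement) =====
-- stated objective: alternative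
-- what changed: Replaces A's single-pass per-character quote/escape state machine with a lex-then-count pipeline: an index loop with an inner literal-skipping loop strips string literals, then str.count tallies the four brace characters on the cleaned text.
import Mathlib
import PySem

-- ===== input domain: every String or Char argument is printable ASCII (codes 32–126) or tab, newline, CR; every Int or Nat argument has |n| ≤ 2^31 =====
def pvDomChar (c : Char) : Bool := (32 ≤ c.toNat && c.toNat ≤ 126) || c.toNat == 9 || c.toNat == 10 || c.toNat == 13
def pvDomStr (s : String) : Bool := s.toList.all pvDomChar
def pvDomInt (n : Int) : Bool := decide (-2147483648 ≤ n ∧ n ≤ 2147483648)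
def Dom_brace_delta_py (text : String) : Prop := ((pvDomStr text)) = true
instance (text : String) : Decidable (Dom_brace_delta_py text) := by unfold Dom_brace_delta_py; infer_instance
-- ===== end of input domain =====

-- B replaces A's per-character quote/escape state machine by a lex-then-count pipeline (strip string literals, then count braces); alternative structure, same cost.

-- ===== PORT A =====
-- fold state: (delta, in_string, quote_char, escape); Python's "" sentinel for quote_char is encoded as none
def braceStepA (st : Int × Bool × Option Char × Bool) (ch : Char) : Int × Bool × Option Char × Bool :=
  let (delta, in_string, quote_char, escape) := st
  if in_string then
    if escape then (delta, in_string, quote_char, false)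
    else if ch = '\\' then (delta, in_string, quote_char, true)
    else if some ch = quote_char then (delta, false, quote_char, escape)
    else st
  else
    if ch = '"' ∨ ch = '\'' then (delta, true, some ch, escape)
    else if ch = '{' ∨ ch = '[' then (delta + 1, in_string, quote_char, escape)
    else if ch = ']' ∨ ch = '}' then (delta - 1, in_string, quote_char, escape)
    else st

def brace_delta_py (text : String) : Int :=
  (text.toList.foldl braceStepA (0, false, none, false)).1

-- ===== PORT B =====
-- inner while loop of Source B: skip the rest of a string literal opened by quote q
def skipLit (q : Char) : List Char → List Char
  | [] => []
  | c :: rest =>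
    if c = '\\' then
      match rest with
      | [] => []          -- i += 2 runs past the end; loop exits
      | _ :: r => skipLit q r
    else if c = q then rest
    else skipLit q rest

-- needed by stripLits's decreasing_by
theorem skipLit_length_le (q : Char) (l : List Char) : (skipLit q l).length ≤ l.length := by
  induction l using skipLit.induct q with
  | case1 => simp [skipLit]
  | case2 => simp [skipLit]
  | case3 c r ih => simp [skipLit]; omega
  | case4 r h1 =>
      rw [show skipLit q (q :: r) = r from by rw [skipLit.eq_def]; simp [h1]]
      simp
  | case5 c r h1 h2 ih =>
      rw [show skipLit q (c :: r) = skipLit q r from by rw [skipLit.eq_def]; simp [h1, h2]]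
      simp; omega

-- outer while loop of Source B: the characters kept after dropping string literals
def stripLits : List Char → List Char
  | [] => []
  | c :: rest =>
    if c = '"' ∨ c = '\'' then stripLits (skipLit c rest)
    else c :: stripLits rest
termination_by l => l.length
decreasing_by
  · exact Nat.lt_succ_of_le (skipLit_length_le _ _)
  · simp

def brace_delta_py_alt (text : String) : Int :=
  let cleaned := stripLits text.toList
  (cleaned.count '{' : Int) + cleaned.count '[' - cleaned.count ']' - cleaned.count '}'

-- ===== PRECONDITION & SPEC =====
def Spec_brace_delta_py (text : String) (out : Int) : Prop := out = brace_delta_py_alt text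
instance (text : String) (out : Int) : Decidable (Spec_brace_delta_py text out) := by unfold Spec_brace_delta_py; infer_instance

-- ===== CLAIM (what is proved, stated in full; the proofs are below) =====
def Claim_equal_brace_delta_py : Prop := ∀ (text : String), Dom_brace_delta_py text → Spec_brace_delta_py text (brace_delta_py text)

-- ===== LEMMAS AND PROOFS =====

def cnt (l : List Char) : Int :=
  (l.count '{' : Int) + l.count '[' - l.count ']' - l.count '}'

theorem cnt_cons (c : Char) (l : List Char) :
    cnt (c :: l) = cnt l + (if c = '{' ∨ c = '[' then 1 else if c = ']' ∨ c = '}' then -1 else 0) := by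
  rcases eq_or_ne c '{' with h | h1 <;> [skip; rcases eq_or_ne c '[' with h | h2] <;>
    [skip; skip; rcases eq_or_ne c ']' with h | h3] <;>
    [skip; skip; skip; rcases eq_or_ne c '}' with h | h4]
  all_goals simp_all [cnt] <;> push_cast <;> ring

-- joint invariant of A's fold: outside a string it computes cnt ∘ stripLits,
-- inside a string opened with quote q (no pending escape) it computes cnt ∘ stripLits ∘ skipLit q
theorem foldA_invariant (n : ℕ) :
    (∀ l : List Char, l.length ≤ n → ∀ (d : Int) (qc : Option Char),
      (l.foldl braceStepA (d, false, qc, false)).1 = d + cnt (stripLits l)) ∧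
    (∀ l : List Char, l.length ≤ n → ∀ (d : Int) (q : Char),
      (l.foldl braceStepA (d, true, some q, false)).1 = d + cnt (stripLits (skipLit q l))) := by
  induction n with
  | zero =>
    constructor <;> intro l hl d x <;>
      · have : l = [] := List.eq_nil_of_length_eq_zero (Nat.le_zero.mp hl)
        subst this; simp [stripLits, skipLit, cnt]
  | succ n ih =>
    obtain ⟨ih1, ih2⟩ := ih
    constructor
    · intro l hl d qc
      match l with
      | [] => simp [stripLits, cnt]
      | c :: rest =>
        have hr : rest.length ≤ n := by simpa using hl
        by_cases hq : c = '"' ∨ c = '\''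
        · have hstep : braceStepA (d, false, qc, false) c = (d, true, some c, false) := by
            rcases hq with h | h <;> simp [braceStepA, h]
          rw [List.foldl_cons, hstep, ih2 rest hr d c]
          simp [stripLits, hq]
        · have hstep : braceStepA (d, false, qc, false) c =
              (d + (if c = '{' ∨ c = '[' then 1 else if c = ']' ∨ c = '}' then -1 else 0), false, qc, false) := by
            simp only [braceStepA]
            split_ifs with h1 h2 h3 <;> simp_all <;> ring_nf
          rw [List.foldl_cons, hstep, ih1 rest hr _ qc]
          simp only [stripLits, if_neg hq]
          rw [cnt_cons]; ring
    · intro l hl d q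
      match l with
      | [] => simp [stripLits, skipLit, cnt]
      | c :: rest =>
        have hr : rest.length ≤ n := by simpa using hl
        by_cases hb : c = '\\'
        · subst hb
          have h1 : braceStepA (d, true, some q, false) '\\' = (d, true, some q, true) := by
            simp [braceStepA]
          rw [List.foldl_cons, h1]
          match rest, hr with
          | [], _ => simp [skipLit, stripLits, cnt]
          | c2 :: r2, hr =>
            have hr2 : r2.length ≤ n := Nat.le_trans (by simp) hr
            have h2 : braceStepA (d, true, some q, true) c2 = (d, true, some q, false) := by
              simp [braceStepA]
            rw [List.foldl_cons, h2, ih2 r2 hr2 d q]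
            rw [show skipLit q ('\\' :: c2 :: r2) = skipLit q r2 from by
              rw [skipLit.eq_def]; simp]
        · by_cases hcq : c = q
          · subst hcq
            have hstep : braceStepA (d, true, some c, false) c = (d, false, some c, false) := by
              simp [braceStepA, hb]
            rw [List.foldl_cons, hstep, ih1 rest hr d (some c)]
            rw [show skipLit c (c :: rest) = rest from by rw [skipLit.eq_def]; simp [hb]]
          · have hstep : braceStepA (d, true, some q, false) c = (d, true, some q, false) := by
              simp [braceStepA, hb, hcq]
            rw [List.foldl_cons, hstep, ih2 rest hr d q]
            rw [show skipLit q (c :: rest) = skipLit q rest from by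
              rw [skipLit.eq_def]; simp [hb, hcq]]

-- ===== VERDICT (by name: the statement is the Claim_ definition above) =====
theorem brace_delta_py_spec : Claim_equal_brace_delta_py := by
  intro text _
  unfold Spec_brace_delta_py brace_delta_py brace_delta_py_alt
  have := (foldA_invariant text.toList.length).1 text.toList (le_refl _) 0 none
  simpa [cnt] using this
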